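-- pv_equiv track=rewrite | github.com/Adrian-Lugowski/Programowanie-gier-komputerowych | lab_07/utils.py | ghost_positions
-- ===== SOURCE A (Python) =====
-- SCREEN_W = 800
--
-- SCREEN_H = 600
--
-- def ghost_positions(x, y, size):
--     positions = [(x, y)]
--
--     if x < size:
--         positions.append((x + SCREEN_W, y))
--     elif x > SCREEN_W - size:
--         positions.append((x - SCREEN_W, y))
--
--     new_positions = []
--     for px, py in positions:
--         if py < size:
--             new_positions.append((px, py + SCREEN_H))
--         elif py > SCREEN_H - size:
--             new_positions.append((px, py - SCREEN_H))
--
--     positions.extend(new_positions)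
--     return positions
-- ===== SOURCE B (Python) =====
-- SCREEN_W = 800
-- SCREEN_H = 600
--
-- def ghost_positions(x, y, size):
--     xs = [x]
--     if x < size:
--         xs.append(x + SCREEN_W)
--     elif x > SCREEN_W - size:
--         xs.append(x - SCREEN_W)
--     ys = [y]
--     if y < size:
--         ys.append(y + SCREEN_H)
--     elif y > SCREEN_H - size:
--         ys.append(y - SCREEN_H)
--     return [(px, py) for py in ys for px in xs]
-- ===== Notes on version B (the rewrite author's own statement) =====
-- stated objective: simpler
-- what changed: B builds per-axis candidate coordinate lists and takes their cartesian product (y outer), replacing A's second pass that scans the partially built position list to append vertically wrapped copies.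
import Mathlib
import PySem

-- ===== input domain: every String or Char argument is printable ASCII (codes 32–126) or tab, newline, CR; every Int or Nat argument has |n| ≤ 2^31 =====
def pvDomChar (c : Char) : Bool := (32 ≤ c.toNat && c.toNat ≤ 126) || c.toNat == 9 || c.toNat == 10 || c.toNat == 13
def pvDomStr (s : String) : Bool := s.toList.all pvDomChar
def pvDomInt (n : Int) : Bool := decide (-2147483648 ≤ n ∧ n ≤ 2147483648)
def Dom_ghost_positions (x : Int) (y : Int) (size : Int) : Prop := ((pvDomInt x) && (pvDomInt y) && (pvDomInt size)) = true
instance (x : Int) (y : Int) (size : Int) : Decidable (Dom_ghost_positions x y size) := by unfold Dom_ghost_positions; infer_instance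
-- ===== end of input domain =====

-- ===== PORT A =====
-- B replaces A's second pass over the built positions list with per-axis candidate
-- lists combined by a cartesian product (simpler decomposition; same return values).
def ghost_positions (x : Int) (y : Int) (size : Int) : List (Int × Int) :=
  let positions : List (Int × Int) := [(x, y)]
  let positions :=
    if x < size then positions ++ [(x + 800, y)]
    else if x > 800 - size then positions ++ [(x - 800, y)]
    else positions
  let new_positions :=
    positions.foldl (fun acc p =>
      if p.2 < size then acc ++ [(p.1, p.2 + 600)]
      else if p.2 > 600 - size then acc ++ [(p.1, p.2 - 600)]
      else acc) []
  positions ++ new_positions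

-- ===== PORT B =====
def ghost_positions_alt (x : Int) (y : Int) (size : Int) : List (Int × Int) :=
  let xs : List Int :=
    if x < size then [x, x + 800]
    else if x > 800 - size then [x, x - 800]
    else [x]
  let ys : List Int :=
    if y < size then [y, y + 600]
    else if y > 600 - size then [y, y - 600]
    else [y]
  ys.flatMap (fun py => xs.map (fun px => (px, py)))

-- ===== PRECONDITION & SPEC =====
def Spec_ghost_positions (x : Int) (y : Int) (size : Int) (out : List (Int × Int)) : Prop := out = ghost_positions_alt x y size
instance (x : Int) (y : Int) (size : Int) (out : List (Int × Int)) : Decidable (Spec_ghost_positions x y size out) := by unfold Spec_ghost_positions; infer_instance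

-- ===== CLAIM (what is proved, stated in full; the proofs are below) =====
def Claim_equal_ghost_positions : Prop := ∀ (x : Int) (y : Int) (size : Int), Dom_ghost_positions x y size → Spec_ghost_positions x y size (ghost_positions x y size)

-- ===== LEMMAS AND PROOFS =====

-- ===== VERDICT (by name: the statement is the Claim_ definition above) =====
theorem ghost_positions_spec : Claim_equal_ghost_positions := by
  intro x y size _
  unfold Spec_ghost_positions ghost_positions ghost_positions_alt
  split_ifs <;> simp [List.foldl, List.flatMap] <;> intros <;>
    split_ifs <;> first | rfl | omega
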